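-- pv_equiv track=rewrite | github.com/openai/deeptype | learning/train_type.py | get_vocab
-- ===== SOURCE A (Python) =====
-- def get_vocab(dataset, max_vocab=-1, extra_words=None):
--     index2word = []
--     occurrence = {}
--     for el in dataset:
--         if el not in occurrence:
--             index2word.append(el)
--             occurrence[el] = 1
--         else:
--             occurrence[el] += 1
--     index2word = sorted(index2word, key=lambda x: occurrence[x], reverse=True)
--     if max_vocab > 0:
--         index2word = index2word[:max_vocab]
--     if extra_words is not None:
--         index2word = extra_words + index2word
--     return index2word
-- ===== SOURCE B (Python) =====
-- def get_vocab(dataset, max_vocab=-1, extra_words=None):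
--     occurrence = {}
--     order = []
--     for el in dataset:
--         if el in occurrence:
--             occurrence[el] += 1
--         else:
--             occurrence[el] = 1
--             order.append(el)
--     max_count = 0
--     for c in occurrence.values():
--         if c > max_count:
--             max_count = c
--     buckets = [[] for _ in range(max_count + 1)]
--     for w in order:
--         buckets[occurrence[w]].append(w)
--     result = []
--     for bucket in reversed(buckets[1:]):
--         result += bucket
--     if max_vocab > 0:
--         result = result[:max_vocab]
--     if extra_words is not None:
--         result = extra_words + result
--     return result
-- ===== Notes on version B (the rewrite author's own statement) =====
-- stated objective: alternative
-- what changed: A's stable comparison sort of the vocabulary by occurrence count is replaced by a counting/bucket sort: words are appended to buckets indexed by their count in first-appearance order and the buckets are emitted from the highest count down, reproducing the stable descending order exactly.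
import Mathlib
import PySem

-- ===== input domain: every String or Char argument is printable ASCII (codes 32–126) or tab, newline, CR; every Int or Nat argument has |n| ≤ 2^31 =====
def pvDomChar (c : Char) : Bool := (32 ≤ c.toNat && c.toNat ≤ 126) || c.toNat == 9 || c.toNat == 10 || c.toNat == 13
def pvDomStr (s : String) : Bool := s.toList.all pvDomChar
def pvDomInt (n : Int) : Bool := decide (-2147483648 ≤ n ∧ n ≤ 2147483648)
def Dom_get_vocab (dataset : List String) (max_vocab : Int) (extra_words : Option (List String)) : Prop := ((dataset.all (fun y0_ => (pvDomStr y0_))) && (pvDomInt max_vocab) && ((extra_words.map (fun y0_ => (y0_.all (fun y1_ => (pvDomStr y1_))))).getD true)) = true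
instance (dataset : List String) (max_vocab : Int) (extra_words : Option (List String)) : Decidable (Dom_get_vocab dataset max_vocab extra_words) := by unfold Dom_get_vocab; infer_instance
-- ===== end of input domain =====

-- B replaces A's comparison sort of the vocabulary by a counting/bucket sort (buckets indexed by
-- occurrence count, filled in first-appearance order, emitted from the highest count down), which
-- preserves A's stable descending order exactly; objective: alternative (a genuinely different algorithm, not measured faster).

-- ===== PORT A =====
-- the body of A's 'for el in dataset' loop: state = (index2word, occurrence)
def getVocabStepA (s : List String × PySem.Dict String Int) (el : String) : List String × PySem.Dict String Int :=
  if ¬ (s.2.contains el) then (s.1 ++ [el], s.2.insert el 1)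
  else (s.1, s.2.modify el 0 (· + 1))

def get_vocab (dataset : List String) (max_vocab : Int) (extra_words : Option (List String)) : List String :=
  let st := dataset.foldl getVocabStepA ([], PySem.Dict.empty)
  let index2word := st.1
  let occurrence := st.2
  -- occurrence[x]: the key is always present (x was appended exactly when it was inserted), so getD is exact
  let index2word := PySem.List.sorted index2word (fun x => occurrence.getD x 0) true
  let index2word := if max_vocab > 0 then PySem.List.slice index2word none (some max_vocab) else index2word
  match extra_words with
  | some ew => ew ++ index2word
  | none => index2word

-- ===== PORT B =====
-- the body of B's counting loop: state = (occurrence, order)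
def getVocabStepB (s : PySem.Dict String Int × List String) (el : String) : PySem.Dict String Int × List String :=
  if s.1.contains el then (s.1.modify el 0 (· + 1), s.2)
  else (s.1.insert el 1, s.2 ++ [el])

-- the body of B's bucket-filling loop; 1 ≤ occurrence[w] ≤ max_count for every w in order,
-- so the index is nonnegative and in range and List.set / pyGetD are exact for buckets[occurrence[w]].append(w)
def getVocabBucketStep (occurrence : PySem.Dict String Int) (bs : List (List String)) (w : String) : List (List String) :=
  bs.set (occurrence.getD w 0).toNat (PySem.List.pyGetD bs (occurrence.getD w 0) [] ++ [w])

def get_vocab_alt (dataset : List String) (max_vocab : Int) (extra_words : Option (List String)) : List String :=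
  let st := dataset.foldl getVocabStepB (PySem.Dict.empty, [])
  let occurrence := st.1
  let order := st.2
  let max_count := occurrence.values.foldl (fun m c => if c > m then c else m) 0
  let buckets : List (List String) := List.replicate (max_count + 1).toNat []
  let buckets := order.foldl (getVocabBucketStep occurrence) buckets
  -- for bucket in reversed(buckets[1:]): result += bucket
  let result := ((PySem.List.slice buckets (some 1) none).reverse).foldl (fun acc b => acc ++ b) []
  let result := if max_vocab > 0 then PySem.List.slice result none (some max_vocab) else result
  match extra_words with
  | some ew => ew ++ result
  | none => result

-- ===== PRECONDITION & SPEC =====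
def Spec_get_vocab (dataset : List String) (max_vocab : Int) (extra_words : Option (List String)) (out : List String) : Prop := out = get_vocab_alt dataset max_vocab extra_words
instance (dataset : List String) (max_vocab : Int) (extra_words : Option (List String)) (out : List String) : Decidable (Spec_get_vocab dataset max_vocab extra_words out) := by unfold Spec_get_vocab; infer_instance

-- ===== CLAIM (what is proved, stated in full; the proofs are below) =====
def Claim_equal_get_vocab : Prop := ∀ (dataset : List String) (max_vocab : Int) (extra_words : Option (List String)), Dom_get_vocab dataset max_vocab extra_words → Spec_get_vocab dataset max_vocab extra_words (get_vocab dataset max_vocab extra_words)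

-- ===== LEMMAS AND PROOFS =====

-- the counting dict both loops build, and the first-appearance order both loops record
def pvModifyFold (dataset : List String) : PySem.Dict String Int :=
  dataset.foldl (fun d x => d.modify x 0 (· + 1)) PySem.Dict.empty

lemma insert_one_eq_modify (d : PySem.Dict String Int) (k : String) (h : d.contains k = false) :
    d.insert k 1 = d.modify k 0 (· + 1) := by
  simp [PySem.Dict.modify, PySem.Dict.getD_of_not_contains _ _ h]

-- both loops, run from a state whose dict-membership agrees with list-membership,
-- produce the modify-fold dict and the Set.update order
lemma loopB_eq (l : List String) : ∀ (d : PySem.Dict String Int) (ws : List String),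
    (∀ x, d.contains x = ws.contains x) →
    l.foldl getVocabStepB (d, ws) =
      (l.foldl (fun d x => d.modify x 0 (· + 1)) d, PySem.Set.update ws l) := by
  induction l with
  | nil => intro d ws _; simp [PySem.Set.update]
  | cons el t ih =>
    intro d ws hinv
    have hinv' : ∀ x, (d.modify el 0 (· + 1)).contains x = (PySem.Set.add ws el).contains x := by
      intro x
      rw [PySem.Dict.contains_modify, hinv]
      by_cases hx : x = el
      · subst hx; simp [PySem.Set.add]; by_cases hm : x ∈ ws <;> simp [hm]
      · have : (x == el) = false := by simpa using hx
        simp [this, PySem.Set.add]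
        by_cases hm : el ∈ ws <;> simp [hm, hx]
    by_cases h : d.contains el = true
    · have hmem : el ∈ ws := by have := hinv el; rw [h] at this; simpa using this.symm
      have hstep : getVocabStepB (d, ws) el = (d.modify el 0 (· + 1), ws) := by
        simp [getVocabStepB, h]
      have hadd : PySem.Set.add ws el = ws := by simp [PySem.Set.add, hmem]
      rw [List.foldl_cons, hstep, ih _ _ (fun x => by rw [hinv' x, hadd]; simp [PySem.Set.contains])]
      simp [PySem.Set.update, hadd]
    · have hmem : el ∉ ws := by
        have := hinv el; rw [eq_false_of_ne_true h] at this
        simpa using this.symm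
      have hstep : getVocabStepB (d, ws) el = (d.modify el 0 (· + 1), ws ++ [el]) := by
        simp [getVocabStepB, h, insert_one_eq_modify d el (eq_false_of_ne_true h)]
      have hadd : PySem.Set.add ws el = ws ++ [el] := by simp [PySem.Set.add, hmem]
      rw [List.foldl_cons, hstep, ih _ _ (fun x => by rw [hinv' x, hadd]; simp [PySem.Set.contains])]
      simp [PySem.Set.update, hadd]

lemma loopA_eq (l : List String) : ∀ (d : PySem.Dict String Int) (ws : List String),
    (∀ x, d.contains x = ws.contains x) →
    l.foldl getVocabStepA (ws, d) =
      (PySem.Set.update ws l, l.foldl (fun d x => d.modify x 0 (· + 1)) d) := by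
  induction l with
  | nil => intro d ws _; simp [PySem.Set.update]
  | cons el t ih =>
    intro d ws hinv
    have hinv' : ∀ x, (d.modify el 0 (· + 1)).contains x = (PySem.Set.add ws el).contains x := by
      intro x
      rw [PySem.Dict.contains_modify, hinv]
      by_cases hx : x = el
      · subst hx; simp [PySem.Set.add]; by_cases hm : x ∈ ws <;> simp [hm]
      · have : (x == el) = false := by simpa using hx
        simp [this, PySem.Set.add]
        by_cases hm : el ∈ ws <;> simp [hm, hx]
    by_cases h : d.contains el = true
    · have hmem : el ∈ ws := by have := hinv el; rw [h] at this; simpa using this.symm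
      have hstep : getVocabStepA (ws, d) el = (ws, d.modify el 0 (· + 1)) := by
        simp [getVocabStepA, h]
      have hadd : PySem.Set.add ws el = ws := by simp [PySem.Set.add, hmem]
      rw [List.foldl_cons, hstep, ih _ _ (fun x => by rw [hinv' x, hadd]; simp [PySem.Set.contains])]
      simp [PySem.Set.update, hadd]
    · have hmem : el ∉ ws := by
        have := hinv el; rw [eq_false_of_ne_true h] at this
        simpa using this.symm
      have hstep : getVocabStepA (ws, d) el = (ws ++ [el], d.modify el 0 (· + 1)) := by
        simp [getVocabStepA, h, insert_one_eq_modify d el (eq_false_of_ne_true h)]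
      have hadd : PySem.Set.add ws el = ws ++ [el] := by simp [PySem.Set.add, hmem]
      rw [List.foldl_cons, hstep, ih _ _ (fun x => by rw [hinv' x, hadd]; simp [PySem.Set.contains])]
      simp [PySem.Set.update, hadd]

lemma stA_eq (dataset : List String) :
    dataset.foldl getVocabStepA ([], PySem.Dict.empty) =
      (PySem.Set.ofList dataset, pvModifyFold dataset) := by
  rw [loopA_eq dataset PySem.Dict.empty [] (fun x => by simp [PySem.Dict.contains_empty])]
  rw [pvModifyFold, PySem.Set.ofList_eq_foldl, PySem.Set.update]

lemma stB_eq (dataset : List String) :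
    dataset.foldl getVocabStepB (PySem.Dict.empty, []) =
      (pvModifyFold dataset, PySem.Set.ofList dataset) := by
  rw [loopB_eq dataset PySem.Dict.empty [] (fun x => by simp [PySem.Dict.contains_empty])]
  rw [pvModifyFold, PySem.Set.ofList_eq_foldl, PySem.Set.update]

lemma getD_pvModifyFold (dataset : List String) (w : String) :
    (pvModifyFold dataset).getD w 0 = (dataset.count w : Int) := by
  rw [pvModifyFold, ← PySem.Dict.counter_eq_foldl, PySem.Dict.getD_counter]

-- ===== the bucket decomposition of a stable descending sort =====

-- [m, m-1, ..., 1] as Ints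
def descList : Nat → List Int
  | 0 => []
  | m + 1 => ((m : Int) + 1) :: descList m

def Fbuck (k : String → Int) (vs : List Int) (p : List String) : List String :=
  vs.flatMap (fun v => p.filter (fun x => k x == v))

lemma mem_descList (m : Nat) (v : Int) : v ∈ descList m ↔ 1 ≤ v ∧ v ≤ m := by
  induction m with
  | zero => simp [descList]; omega
  | succ m ih => simp [descList, ih]; omega

lemma pairwise_descList (m : Nat) : (descList m).Pairwise (· > ·) := by
  induction m with
  | zero => simp [descList]
  | succ m ih =>
    refine List.pairwise_cons.mpr ⟨?_, ih⟩
    intro v hv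
    have := (mem_descList m v).mp hv
    omega

lemma insertBy_skip (b : String → String → Bool) (x : String) (l m : List String)
    (h : ∀ y ∈ l, b x y = false) :
    PySem.List.insertBy b x (l ++ m) = l ++ PySem.List.insertBy b x m := by
  induction l with
  | nil => simp
  | cons y t ih =>
    simp only [List.cons_append, PySem.List.insertBy, h y (by simp)]
    simp [ih (fun z hz => h z (by simp [hz]))]

lemma mem_Fbuck {k : String → Int} {vs : List Int} {p : List String} {y : String}
    (hy : y ∈ Fbuck k vs p) : k y ∈ vs := by
  simp only [Fbuck, List.mem_flatMap, List.mem_filter] at hy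
  obtain ⟨v, hv, _, he⟩ := hy
  simpa [(by simpa using he : k y = v)] using hv

lemma insertBy_Fbuck (k : String → Int) (vs : List Int) (hvs : vs.Pairwise (· > ·))
    (x : String) (hx : k x ∈ vs) (p : List String) :
    PySem.List.insertBy (fun a b => decide (k b < k a)) x (Fbuck k vs p)
      = Fbuck k vs (p ++ [x]) := by
  induction vs with
  | nil => simp at hx
  | cons v vs' ih =>
    have hgt : ∀ v' ∈ vs', v > v' := (List.pairwise_cons.mp hvs).1
    have hcons : ∀ q, Fbuck k (v :: vs') q = q.filter (fun y => k y == v) ++ Fbuck k vs' q :=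
      fun q => rfl
    by_cases hxv : k x = v
    · -- x lands at the end of the head bucket; later buckets unchanged
      have h1 : PySem.List.insertBy (fun a b => decide (k b < k a)) x (Fbuck k (v :: vs') p)
          = p.filter (fun y => k y == v) ++ PySem.List.insertBy (fun a b => decide (k b < k a)) x (Fbuck k vs' p) := by
        rw [hcons]
        apply insertBy_skip
        intro y hy
        have : k y = v := by simpa using (List.mem_filter.mp hy).2
        simp [this, hxv]
      have h2 : PySem.List.insertBy (fun a b => decide (k b < k a)) x (Fbuck k vs' p)
          = x :: Fbuck k vs' p := by
        cases hF : Fbuck k vs' p with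
        | nil => simp [PySem.List.insertBy]
        | cons y t =>
          have hy : k y ∈ vs' := mem_Fbuck (by rw [hF]; simp)
          have : k y < k x := by rw [hxv]; exact hgt _ hy
          simp [PySem.List.insertBy, this]
      have h3 : Fbuck k vs' (p ++ [x]) = Fbuck k vs' p := by
        unfold Fbuck
        apply List.flatMap_congr
        intro v' hv'
        have : ¬ (k x = v') := by have := hgt v' hv'; omega
        simp [List.filter_append, this]
      rw [h1, h2, hcons, h3, List.filter_append]
      simp [hxv]
    · -- x skips the head bucket and recurses into the tail
      have hxvs' : k x ∈ vs' := by
        rcases List.mem_cons.mp hx with h | h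
        · exact absurd h hxv
        · exact h
      have hlt : k x < v := hgt _ hxvs'
      have h1 : PySem.List.insertBy (fun a b => decide (k b < k a)) x (Fbuck k (v :: vs') p)
          = p.filter (fun y => k y == v) ++ PySem.List.insertBy (fun a b => decide (k b < k a)) x (Fbuck k vs' p) := by
        rw [hcons]
        apply insertBy_skip
        intro y hy
        have : k y = v := by simpa using (List.mem_filter.mp hy).2
        simp [this]
        omega
      rw [h1, ih (List.pairwise_cons.mp hvs).2 hxvs', hcons, List.filter_append]
      have : ¬ (k x = v) := hxv
      simp [this]

lemma sorted_eq_Fbuck (k : String → Int) (vs : List Int) (hvs : vs.Pairwise (· > ·))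
    (l : List String) (hl : ∀ x ∈ l, k x ∈ vs) :
    PySem.List.sorted l k true = Fbuck k vs l := by
  rw [PySem.List.sorted_rev_eq_foldl_insertBy]
  have main : ∀ (t : List String) (p : List String), (∀ x ∈ t, k x ∈ vs) →
      t.foldl (fun acc x => PySem.List.insertBy (fun a b => decide (k b < k a)) x acc) (Fbuck k vs p)
        = Fbuck k vs (p ++ t) := by
    intro t
    induction t with
    | nil => intro p _; simp
    | cons x t' ih =>
      intro p ht
      rw [List.foldl_cons, insertBy_Fbuck k vs hvs x (ht x (by simp)) p,
        ih (p ++ [x]) (fun y hy => ht y (by simp [hy]))]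
      simp
  have h0 : Fbuck k vs [] = [] := by simp [Fbuck]
  have := main l [] hl
  rw [h0] at this
  simpa using this

-- ===== the max-count loop =====

lemma maxfold_eq (vals : List Int) :
    vals.foldl (fun m c => if c > m then c else m) 0 = vals.foldl max 0 := by
  have h : (fun (m c : Int) => if c > m then c else m) = fun (m c : Int) => max m c := by
    funext m c
    simp only [max_def]
    split_ifs <;> omega
  rw [h]

def pvMaxCount (dataset : List String) : Int :=
  (pvModifyFold dataset).values.foldl (fun m c => if c > m then c else m) 0

lemma pvMaxCount_nonneg (dataset : List String) : 0 ≤ pvMaxCount dataset := by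
  rw [pvMaxCount, maxfold_eq]
  exact (PySem.List.le_foldl_max _ _).1

lemma values_pvModifyFold (dataset : List String) :
    (pvModifyFold dataset).values
      = (PySem.Set.ofList dataset).map (fun w => (dataset.count w : Int)) := by
  rw [pvModifyFold, ← PySem.Dict.counter_eq_foldl,
      PySem.Dict.values_eq_map_keys _ (PySem.Dict.nodup_keys_counter dataset) 0,
      PySem.Dict.keys_counter]
  exact List.map_congr_left (fun k _ => PySem.Dict.getD_counter dataset k)

lemma count_le_pvMaxCount (dataset : List String) (w : String)
    (h : w ∈ PySem.Set.ofList dataset) : (dataset.count w : Int) ≤ pvMaxCount dataset := by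
  rw [pvMaxCount, maxfold_eq]
  exact (PySem.List.le_foldl_max _ _).2 _ (by rw [values_pvModifyFold]; exact List.mem_map_of_mem h)

-- ===== the bucket-filling loop =====

lemma set_map_range (n : Nat) (g : Nat → List String) (j : Nat) (_hj : j < n) (w : String)
    (kw : Int) (hkw : kw = (j : Int)) :
    (((List.range n).map g).set j (g j ++ [w]))
      = (List.range n).map (fun (c : Nat) => g c ++ if kw == (c : Int) then [w] else []) := by
  apply List.ext_getElem
  · simp
  · intro i h1 h2
    have hi : i < n := by simpa using h2
    rw [List.getElem_set]
    by_cases hij : j = i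
    · subst hij
      simp [hkw]
    · have hne : ¬ (kw == (i : Int)) = true := by
        simp [hkw]
        omega
      simp [hij]
      simpa using hne

lemma buckets_loop (occ : PySem.Dict String Int) (n : Nat) (l : List String) :
    ∀ (p : List String), (∀ w ∈ l, 1 ≤ occ.getD w 0 ∧ (occ.getD w 0).toNat < n) →
    l.foldl (getVocabBucketStep occ)
        ((List.range n).map (fun (c : Nat) => p.filter (fun w => occ.getD w 0 == (c : Int))))
      = (List.range n).map (fun (c : Nat) => (p ++ l).filter (fun w => occ.getD w 0 == (c : Int))) := by
  induction l with
  | nil => intro p _; simp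
  | cons w t ih =>
    intro p hb
    have hw := hb w (by simp)
    set kw := occ.getD w 0 with hkwdef
    have hkw : kw = ((kw.toNat : Nat) : Int) := by omega
    have hj : kw.toNat < n := hw.2
    have hget : PySem.List.pyGetD ((List.range n).map (fun (c : Nat) => p.filter (fun w => occ.getD w 0 == (c : Int)))) kw []
        = p.filter (fun w' => occ.getD w' 0 == ((kw.toNat : Nat) : Int)) := by
      rw [hkw, PySem.List.pyGetD_natCast, List.getD_eq_getElem _ _ (by simpa using hj)]
      simp
    have hstep : getVocabBucketStep occ ((List.range n).map (fun (c : Nat) => p.filter (fun w => occ.getD w 0 == (c : Int)))) w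
        = (List.range n).map (fun (c : Nat) => (p ++ [w]).filter (fun w' => occ.getD w' 0 == (c : Int))) := by
      rw [getVocabBucketStep, ← hkwdef, hget,
        set_map_range n (fun (c : Nat) => p.filter (fun w' => occ.getD w' 0 == (c : Int))) kw.toNat hj w kw hkw]
      apply List.map_congr_left
      intro c _
      rw [List.filter_append]
      congr 1
      simp only [List.filter_singleton]
      rw [← hkwdef, Bool.cond_eq_ite]
    rw [List.foldl_cons, hstep, ih (p ++ [w]) (fun y hy => hb y (by simp [hy]))]
    simp

lemma tail_reverse_map_range (m : Nat) (g : Nat → List String) :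
    ((List.range (m + 1)).map g).tail.reverse = (descList m).map (fun v => g v.toNat) := by
  induction m with
  | zero => simp [descList, List.range_succ]
  | succ m ih =>
    rw [List.range_succ, List.map_append,
      List.tail_append_of_ne_nil (by simp [List.range_succ]), List.reverse_append]
    simp only [List.map_cons, List.map_nil, List.reverse_cons, List.reverse_nil, List.nil_append,
      List.singleton_append, ih]
    have : (((m : Int) + 1)).toNat = m + 1 := by omega
    simp [descList, this]

-- ===== assembling the B pipeline into Fbuck =====

lemma alt_buckets_eq_Fbuck (dataset : List String) :
    (((PySem.List.slice
        ((PySem.Set.ofList dataset).foldl (getVocabBucketStep (pvModifyFold dataset))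
          (List.replicate (pvMaxCount dataset + 1).toNat []))
        (some 1) none).reverse).foldl (fun acc b => acc ++ b) [])
      = Fbuck (fun w => (pvModifyFold dataset).getD w 0)
          (descList (pvMaxCount dataset).toNat) (PySem.Set.ofList dataset) := by
  have hnn := pvMaxCount_nonneg dataset
  set m := (pvMaxCount dataset).toNat with hm
  have hrep : (pvMaxCount dataset + 1).toNat = m + 1 := by omega
  have hinit : (List.replicate (m + 1) [] : List (List String))
      = (List.range (m + 1)).map (fun (c : Nat) => ([] : List String).filter (fun w => (pvModifyFold dataset).getD w 0 == (c : Int))) := by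
    simp
  have hbound : ∀ w ∈ PySem.Set.ofList dataset,
      1 ≤ (pvModifyFold dataset).getD w 0 ∧ ((pvModifyFold dataset).getD w 0).toNat < m + 1 := by
    intro w hwmem
    have hc := getD_pvModifyFold dataset w
    have h1 : 1 ≤ dataset.count w := List.one_le_count_iff.mpr ((PySem.Set.mem_ofList dataset w).mp hwmem)
    have h2 := count_le_pvMaxCount dataset w hwmem
    constructor
    · rw [hc]; exact_mod_cast h1
    · rw [hc]; omega
  rw [hrep, hinit, buckets_loop _ (m + 1) _ [] hbound, List.nil_append,
    PySem.List.slice_from_one, tail_reverse_map_range, PySem.List.foldl_append_eq_flatten,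
    List.nil_append, ← List.flatMap_def, Fbuck]
  apply List.flatMap_congr
  intro v hv
  have h1 : 1 ≤ v := ((mem_descList m v).mp hv).1
  have : ((v.toNat : Nat) : Int) = v := by omega
  rw [this]

-- ===== the A side as Fbuck =====

lemma sorted_eq_Fbuck_final (dataset : List String) :
    PySem.List.sorted (PySem.Set.ofList dataset) (fun x => (pvModifyFold dataset).getD x 0) true
      = Fbuck (fun w => (pvModifyFold dataset).getD w 0)
          (descList (pvMaxCount dataset).toNat) (PySem.Set.ofList dataset) := by
  apply sorted_eq_Fbuck _ _ (pairwise_descList _)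
  intro x hx
  rw [mem_descList, getD_pvModifyFold]
  have hnn := pvMaxCount_nonneg dataset
  have h1 : 1 ≤ dataset.count x := List.one_le_count_iff.mpr ((PySem.Set.mem_ofList dataset x).mp hx)
  have h2 := count_le_pvMaxCount dataset x hx
  constructor
  · exact_mod_cast h1
  · omega

-- ===== VERDICT (by name: the statement is the Claim_ definition above) =====
theorem get_vocab_spec : Claim_equal_get_vocab := by
  unfold Claim_equal_get_vocab Spec_get_vocab
  intro dataset max_vocab extra_words _
  simp only [get_vocab, get_vocab_alt, stA_eq, stB_eq]
  rw [sorted_eq_Fbuck_final, ← alt_buckets_eq_Fbuck]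
  rw [show List.foldl (fun m c => if c > m then c else m) 0 (pvModifyFold dataset).values = pvMaxCount dataset from rfl]
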